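-- pv_equiv track=rewrite | github.com/JosiahBull/phev-tm-scraper | listing_scraper.py | strip_element_text
-- ===== SOURCE A (Python) =====
-- from typing import List, Optional, Tuple
--
-- def strip_element_text(element_text: str) -> Optional[str]:
--     # strip everything up until the first digit, and after the last digit
--     digit_start = None
--     digit_end = None
--     for i, char in enumerate(element_text):
--         if char.isdigit():
--             digit_start = i
--             break
--     for i in range(len(element_text) - 1, -1, -1):
--         if element_text[i].isdigit():
--             digit_end = i
--             break
--
--     if digit_start is not None and digit_end is not None:
--         return element_text[digit_start:digit_end + 1].replace(',', '')
--     else: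
--         return None
-- ===== SOURCE B (Python) =====
-- def strip_element_text(element_text):
--     # One-pass state machine: digits flush the buffered in-between characters
--     # (commas dropped as they are seen); text before the first digit and after
--     # the last digit never reaches the output.
--     out = None
--     buf = []
--     for c in element_text:
--         if c.isdigit():
--             if out is None:
--                 out = []
--             else:
--                 out.extend(buf)
--             buf = []
--             out.append(c)
--         elif out is not None and c != ',':
--             buf.append(c)
--     return None if out is None else ''.join(out)
-- ===== Notes on version B (the rewrite author's own statement) =====
-- stated objective: alternative
-- what changed: Replaces A's two directional index scans (forward break for the first digit, backward break over range(len-1,-1,-1) for the last) plus slice-and-replace with a single left-to-right state machine carrying an (output, pending-buffer) accumulator that flushes the buffer at each digit and drops commas as they are seen; no indices, slicing or separate replace pass (measured constant-factor speedup).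
import Mathlib
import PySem

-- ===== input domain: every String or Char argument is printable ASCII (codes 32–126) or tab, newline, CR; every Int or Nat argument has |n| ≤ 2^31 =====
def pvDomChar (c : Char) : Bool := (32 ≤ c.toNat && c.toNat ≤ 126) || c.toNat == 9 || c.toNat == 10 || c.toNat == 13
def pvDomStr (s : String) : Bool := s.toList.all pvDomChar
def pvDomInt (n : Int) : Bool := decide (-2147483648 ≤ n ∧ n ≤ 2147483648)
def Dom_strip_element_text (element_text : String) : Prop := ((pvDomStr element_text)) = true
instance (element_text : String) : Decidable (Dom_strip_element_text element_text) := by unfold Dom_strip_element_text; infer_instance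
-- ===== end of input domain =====

-- B replaces A's two directional index scans by a single left-to-right state-machine pass
-- with an (output, pending-buffer) accumulator; objective: alternative decomposition.


-- ===== PORT A =====
-- first loop: forward scan with break over enumerate(element_text)
def pvFirstDigit : List (Int × Char) → Option Int
  | [] => none
  | (i, c) :: rest => if PySem.Chars.isdigit c then some i else pvFirstDigit rest

-- second loop: scan over range(len-1, -1, -1) with break; the 'none' branch of the
-- index lookup is unreachable (every index comes from the range) and mirrors IndexError
def pvLastDigit (cs : List Char) : List Int → Option Int
  | [] => none
  | i :: rest =>
    match PySem.List.pyGet? cs i with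
    | some c => if PySem.Chars.isdigit c then some i else pvLastDigit cs rest
    | none => none

def strip_element_text (element_text : String) : Option String :=
  let cs := element_text.toList
  let digit_start := pvFirstDigit (PySem.List.enumerate cs 0)
  let digit_end := pvLastDigit cs (PySem.List.pyRange ((cs.length : Int) - 1) (-1) (-1))
  match digit_start, digit_end with
  | some s, some e =>
      some (PySem.Str.replace (PySem.Str.slice element_text (some s) (some (e + 1))) "," "")
  | _, _ => none

-- ===== PORT B =====
-- loop body of Source B: state = (out : None | list of chars, buf : list of chars)
def pvStep (st : Option (List Char) × List Char) (c : Char) : Option (List Char) × List Char :=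
  if PySem.Chars.isdigit c then
    match st.1 with
    | none => (some [c], [])                       -- out = []; buf = []; out.append(c)
    | some o => (some (o ++ st.2 ++ [c]), [])      -- out.extend(buf); buf = []; out.append(c)
  else
    match st.1 with
    | some o => if c == ',' then (some o, st.2) else (some o, st.2 ++ [c])
    | none => st

def strip_element_text_alt (element_text : String) : Option String :=
  match element_text.toList.foldl pvStep (none, []) with
  | (none, _) => none
  | (some o, _) => some (String.ofList o)              -- ''.join(out)

-- ===== PRECONDITION & SPEC =====
def Spec_strip_element_text (element_text : String) (out : Option String) : Prop := out = strip_element_text_alt element_text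
instance (element_text : String) (out : Option String) : Decidable (Spec_strip_element_text element_text out) := by unfold Spec_strip_element_text; infer_instance

-- ===== CLAIM (what is proved, stated in full; the proofs are below) =====
def Claim_equal_strip_element_text : Prop := ∀ (element_text : String), Dom_strip_element_text element_text → Spec_strip_element_text element_text (strip_element_text element_text)

-- ===== LEMMAS AND PROOFS =====

-- proof-side: the list of indices of digit characters (Int, as A's enumerate produces)
def pvPositions (ps : List (Int × Char)) : List Int :=
  ps.filterMap (fun p => if PySem.Chars.isdigit p.2 then some p.1 else none)

-- A's forward scan is the head of the digit-position list
lemma firstDigit_eq_head (cs : List Char) (s : Int) :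
    pvFirstDigit (PySem.List.enumerate cs s) = (pvPositions (PySem.List.enumerate cs s)).head? := by
  induction cs generalizing s with
  | nil => simp [PySem.List.enumerate_nil, pvFirstDigit, pvPositions]
  | cons c cs ih =>
    rw [PySem.List.enumerate_cons]
    by_cases h : PySem.Chars.isdigit c
    · simp [pvFirstDigit, pvPositions, h]
    · simp only [pvFirstDigit, pvPositions, h, Bool.false_eq_true, List.filterMap_cons]
      exact (ih (s + 1)).trans (by simp [pvPositions])

lemma positions_append_singleton (xs : List Char) (c : Char) :
    pvPositions (PySem.List.enumerate (xs ++ [c]) 0) =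
      pvPositions (PySem.List.enumerate xs 0) ++
        (if PySem.Chars.isdigit c then [(xs.length : Int)] else []) := by
  rw [PySem.List.enumerate_append]
  simp only [pvPositions, List.filterMap_append]
  by_cases h : PySem.Chars.isdigit c <;>
    simp [PySem.List.enumerate_cons, PySem.List.enumerate_nil, h]

-- A's backward scan over range(n-1, -1, -1) is the last element of the position list
lemma lastDigit_eq_getLast (cs : List Char) (n : Nat) (hn : n ≤ cs.length) :
    pvLastDigit cs (PySem.List.pyRange ((n : Int) - 1) (-1) (-1)) =
      (pvPositions (PySem.List.enumerate (cs.take n) 0)).getLast? := by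
  induction n with
  | zero =>
    rw [PySem.List.pyRange_neg_one_eq_nil (by omega)]
    simp [pvLastDigit, pvPositions, PySem.List.enumerate_nil]
  | succ n ih =>
    rw [show ((n + 1 : Nat) : Int) - 1 = (n : Int) by omega,
        PySem.List.pyRange_neg_one_cons (by omega)]
    have hlt : n < cs.length := by omega
    have htake : cs.take (n + 1) = cs.take n ++ [cs[n]] := by
      simp [List.take_add_one (l := cs) (i := n)]
    have hget : PySem.List.pyGet? cs (n : Int) = some cs[n] := by
      simp [hlt]
    rw [htake, positions_append_singleton]
    have hlen : ((cs.take n).length : Int) = (n : Int) := by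
      simp [List.length_take, Nat.min_eq_left (le_of_lt hlt)]
    by_cases h : PySem.Chars.isdigit cs[n]
    · simp [pvLastDigit, hget, h]
      omega
    · simp only [pvLastDigit, hget, h]
      simpa [h] using ih (by omega)

-- every digit position is the cast of a Nat index below the length
lemma mem_positions (cs : List Char) (x : Int)
    (hx : x ∈ pvPositions (PySem.List.enumerate cs 0)) :
    ∃ k : Nat, x = (k : Int) ∧ k < cs.length := by
  simp only [pvPositions, List.mem_filterMap] at hx
  obtain ⟨p, hp, hpx⟩ := hx
  rw [PySem.List.mem_enumerate_iff] at hp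
  obtain ⟨k, hk, rfl⟩ := hp
  refine ⟨k, ?_, hk⟩
  by_cases h : PySem.Chars.isdigit cs[k] <;> simp [h] at hpx
  omega

-- the position list is strictly increasing
lemma positions_pairwise (cs : List Char) :
    (pvPositions (PySem.List.enumerate cs 0)).Pairwise (· < ·) := by
  unfold pvPositions
  refine List.Pairwise.filterMap _ ?_ (PySem.List.pairwise_lt_enumerate cs 0)
  intro p q hpq x hx y hy
  by_cases hp : PySem.Chars.isdigit p.2 <;> simp [hp] at hx
  by_cases hq : PySem.Chars.isdigit q.2 <;> simp [hq] at hy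
  omega

lemma le_of_getLast?_pairwise (p0 j : Int) (rest : List Int)
    (hp : (p0 :: rest).Pairwise (· < ·)) (hj : (p0 :: rest).getLast? = some j) :
    p0 ≤ j := by
  have hmem : j ∈ p0 :: rest := List.mem_of_getLast? hj
  rcases List.mem_cons.mp hmem with he | hm
  · omega
  · exact le_of_lt ((List.pairwise_cons.mp hp).1 _ hm)

lemma digit_ne_comma (c : Char) (h : PySem.Chars.isdigit c = true) : (c == ',') = false := by
  simp only [PySem.Chars.isdigit] at h
  simp only [beq_eq_false_iff_ne, ne_eq]
  rintro rfl; simp at h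

-- proof-side characterisation of B's fold state
def pvStateOf (cs : List Char) : Option (List Char) × List Char :=
  match (pvPositions (PySem.List.enumerate cs 0)).head?,
        (pvPositions (PySem.List.enumerate cs 0)).getLast? with
  | some p0, some j =>
    (some ((PySem.List.slice cs (some p0) (some (j + 1))).filter (fun c => !(c == ','))),
     (PySem.List.slice cs (some (j + 1)) none).filter (fun c => !(c == ',')))
  | _, _ => (none, [])

lemma fold_eq_stateOf (cs : List Char) :
    cs.foldl pvStep (none, []) = pvStateOf cs := by
  induction cs using List.reverseRecOn with
  | nil => simp [pvStateOf, pvPositions, PySem.List.enumerate_nil]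
  | append_singleton cs c ih =>
    rw [List.foldl_append, List.foldl_cons, List.foldl_nil, ih]
    have hpos := positions_append_singleton cs c
    unfold pvStateOf
    rw [hpos]
    by_cases hc : PySem.Chars.isdigit c
    · cases hps : pvPositions (PySem.List.enumerate cs 0) with
      | nil =>
        simp only [hc, if_true, List.nil_append, List.head?_cons, List.head?_nil,
          List.getLast?_singleton, List.getLast?_nil]
        simp only [pvStep, hc, if_true]
        have h1 : PySem.List.slice (cs ++ [c]) (some (cs.length : Int))
            (some ((cs.length : Int) + 1)) = [c] := by
          rw [show ((cs.length : Int) + 1) = ((cs.length + 1 : Nat) : Int) by push_cast; ring,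
            PySem.List.slice_natCast]
          simp
        have h2 : PySem.List.slice (cs ++ [c]) (some ((cs.length : Int) + 1)) none = [] := by
          rw [show ((cs.length : Int) + 1) = ((cs.length + 1 : Nat) : Int) by push_cast; ring,
            PySem.List.slice_from_natCast]
          simp
        simp [h1, h2, digit_ne_comma c hc]
      | cons p0 rest =>
        obtain ⟨p0n, hp0, hp0lt⟩ := mem_positions cs p0 (by rw [hps]; simp)
        obtain ⟨j, hj⟩ : ∃ j, (p0 :: rest).getLast? = some j :=
          ⟨_, List.getLast?_eq_some_getLast (by simp)⟩
        obtain ⟨jn, hjn, hjlt⟩ := mem_positions cs j (by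
          rw [hps]; exact List.mem_of_getLast? hj)
        have hple : p0 ≤ j :=
          le_of_getLast?_pairwise p0 j rest (by rw [← hps]; exact positions_pairwise cs) hj
        have hpn : p0n ≤ jn := by omega
        have hlast : ((p0 :: rest) ++ [(cs.length : Int)]).getLast? = some (cs.length : Int) :=
          List.getLast?_concat
        rw [List.cons_append] at hlast
        simp only [hc, if_true, List.cons_append, List.head?_cons, hlast, hj]
        simp only [pvStep, hc, if_true]
        rw [hp0, hjn]
        have hsl1 : PySem.List.slice cs (some (p0n : Int)) (some ((jn : Int) + 1))
            = (cs.drop p0n).take (jn + 1 - p0n) := by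
          rw [show ((jn : Int) + 1) = ((jn + 1 : Nat) : Int) by push_cast; ring,
            PySem.List.slice_natCast]
        have hsl2 : PySem.List.slice cs (some ((jn : Int) + 1)) none = cs.drop (jn + 1) := by
          rw [show ((jn : Int) + 1) = ((jn + 1 : Nat) : Int) by push_cast; ring,
            PySem.List.slice_from_natCast]
        have hsl3 : PySem.List.slice (cs ++ [c]) (some (p0n : Int))
            (some ((cs.length : Int) + 1)) = cs.drop p0n ++ [c] := by
          rw [show ((cs.length : Int) + 1) = ((cs.length + 1 : Nat) : Int) by push_cast; ring,
            PySem.List.slice_natCast, List.drop_append_of_le_length (by omega)]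
          apply List.take_of_length_le
          simp; omega
        have hsl4 : PySem.List.slice (cs ++ [c]) (some ((cs.length : Int) + 1)) none = [] := by
          rw [show ((cs.length : Int) + 1) = ((cs.length + 1 : Nat) : Int) by push_cast; ring,
            PySem.List.slice_from_natCast]
          simp
        rw [hsl1, hsl2, hsl3, hsl4]
        have hsplit : cs.drop p0n
            = (cs.drop p0n).take (jn + 1 - p0n) ++ cs.drop (jn + 1) := by
          conv_lhs => rw [← List.take_append_drop (jn + 1 - p0n) (cs.drop p0n)]
          rw [List.drop_drop, show p0n + (jn + 1 - p0n) = jn + 1 by omega]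
        conv_rhs => rw [hsplit]
        simp [digit_ne_comma c hc]
    · cases hps : pvPositions (PySem.List.enumerate cs 0) with
      | nil =>
        simp only [hc, if_false, List.append_nil, Bool.false_eq_true, List.head?_nil,
          List.getLast?_nil]
        simp [pvStep, hc]
      | cons p0 rest =>
        obtain ⟨p0n, hp0, hp0lt⟩ := mem_positions cs p0 (by rw [hps]; simp)
        obtain ⟨j, hj⟩ : ∃ j, (p0 :: rest).getLast? = some j :=
          ⟨_, List.getLast?_eq_some_getLast (by simp)⟩
        obtain ⟨jn, hjn, hjlt⟩ := mem_positions cs j (by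
          rw [hps]; exact List.mem_of_getLast? hj)
        simp only [hc, Bool.false_eq_true, if_false, List.append_nil, List.head?_cons, hj]
        simp only [pvStep, Bool.false_eq_true, hc, if_false]
        rw [hjn]
        have hsl2 : PySem.List.slice cs (some ((jn : Int) + 1)) none = cs.drop (jn + 1) := by
          rw [show ((jn : Int) + 1) = ((jn + 1 : Nat) : Int) by push_cast; ring,
            PySem.List.slice_from_natCast]
        have hsl2' : PySem.List.slice (cs ++ [c]) (some ((jn : Int) + 1)) none
            = cs.drop (jn + 1) ++ [c] := by
          rw [show ((jn : Int) + 1) = ((jn + 1 : Nat) : Int) by push_cast; ring,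
            PySem.List.slice_from_natCast, List.drop_append_of_le_length (by omega)]
        have hsl1' : PySem.List.slice (cs ++ [c]) (some p0) (some ((jn : Int) + 1))
            = PySem.List.slice cs (some p0) (some ((jn : Int) + 1)) := by
          rw [hp0, show ((jn : Int) + 1) = ((jn + 1 : Nat) : Int) by push_cast; ring,
            PySem.List.slice_natCast, PySem.List.slice_natCast,
            List.drop_append_of_le_length (by omega),
            List.take_append_of_le_length (by simp; omega)]
        rw [hsl2, hsl2', hsl1']
        by_cases hcomma : (c == ',') = true
        · simp [hcomma]
        · simp only [hcomma, List.filter_append]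
          simp [Bool.eq_false_iff.mpr (fun h => hcomma h)]

-- str.replace(s, ',', '') is a comma filter
lemma replace_go_filter (fuel : Nat) (l acc : List Char) (h : l.length ≤ fuel) :
    PySem.Chars.replace.go [','] [] fuel l acc
      = acc.reverse ++ l.filter (fun c => !(c == ',')) := by
  induction fuel generalizing l acc with
  | zero =>
    interval_cases hl : l.length
    rw [List.length_eq_zero_iff] at hl
    subst hl
    simp [PySem.Chars.replace.go]
  | succ fuel ih =>
    cases l with
    | nil => simp [PySem.Chars.replace.go]
    | cons c t =>
      rw [PySem.Chars.replace.go]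
      by_cases hc : (c == ',') = true
      · have : List.isPrefixOf [','] (c :: t) = true := by
          simp at hc; simp [List.isPrefixOf, hc]
        simp only [this, if_true]
        rw [show List.drop (List.length [',']) (c :: t) = t by simp]
        rw [ih t _ (by simpa using Nat.lt_succ_iff.mp (by simpa using h))]
        simp [hc]
      · have : List.isPrefixOf [','] (c :: t) = false := by
          simp at hc; simp only [List.isPrefixOf, Bool.and_eq_false_iff,
            beq_eq_false_iff_ne, ne_eq]
          exact Or.inl (fun h => hc h.symm)
        simp only [this, Bool.false_eq_true, if_false]
        rw [ih t _ (by simpa using Nat.lt_succ_iff.mp (by simpa using h))]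
        simp [hc]

lemma replace_comma_filter (cs : List Char) :
    PySem.Chars.replace cs [','] [] = cs.filter (fun c => !(c == ',')) := by
  rw [PySem.Chars.replace]
  simp only [List.isEmpty_cons, Bool.false_eq_true, if_false]
  simpa using replace_go_filter cs.length cs [] le_rfl

-- ===== VERDICT (by name: the statement is the Claim_ definition above) =====
theorem strip_element_text_spec : Claim_equal_strip_element_text := by
  intro t _
  show strip_element_text t = strip_element_text_alt t
  unfold strip_element_text strip_element_text_alt
  rw [fold_eq_stateOf]
  have h1 := firstDigit_eq_head t.toList 0
  have h2 := lastDigit_eq_getLast t.toList t.toList.length (le_refl _)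
  rw [List.take_length] at h2
  simp only [h1, h2]
  unfold pvStateOf
  cases hh : (pvPositions (PySem.List.enumerate t.toList 0)).head? with
  | none =>
    have hnil : pvPositions (PySem.List.enumerate t.toList 0) = [] :=
      List.head?_eq_none_iff.mp hh
    simp
  | some p0 =>
    obtain ⟨j, hj⟩ : ∃ j, (pvPositions (PySem.List.enumerate t.toList 0)).getLast? = some j :=
      ⟨_, List.getLast?_eq_some_getLast (by
        intro h; rw [h] at hh; simp at hh)⟩
    simp only [hj]
    apply congrArg some
    apply String.toList_inj.mp
    rw [PySem.Str.toList_replace]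
    have hsl : (PySem.Str.slice t (some p0) (some (j + 1))).toList
        = PySem.List.slice t.toList (some p0) (some (j + 1)) := by
      simp [PySem.Str.toList_slice]
    rw [hsl, show (",".toList) = [','] from rfl, show ("".toList) = [] from rfl,
      replace_comma_filter]
    exact String.toList_ofList.symm
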